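-- pv_equiv track=rewrite | github.com/DenzilFrancisCrasta/codeforces | 1526B_I_Hate_1111.py | solve
-- ===== SOURCE A (Python) =====
-- def solve(n, divisor):
--
--   if divisor <= 1 or n < 11 or len(str(n)) == 2 and n % 11 != 0:
--     return False
--
--   if n % int('1'*divisor) == 0:
--     return True
--
--   if divisor == 2 :
--     return n % 11 == 0
--
--   return solve(n - int('1'*divisor), divisor) or solve(n, divisor-1)
-- ===== SOURCE B (Python) =====
-- def solve(n, divisor):
--     # Closed form: for divisor >= 3 the repunits 11 and 111 already generate all
--     # representable numbers, so n is a sum of repunits of length 2..divisor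
--     # iff 111 * (n % 11) <= n.
--     if divisor <= 1 or n < 11:
--         return False
--     if divisor == 2:
--         return n % 11 == 0
--     return 111 * (n % 11) <= n
-- ===== Notes on version B (the rewrite author's own statement) =====
-- stated objective: faster
-- what changed: Replaced the unmemoized branching recursion over repunit subtractions by an O(1) closed-form test (for divisor >= 3, n is a sum of repunits iff 111*(n % 11) <= n; for divisor == 2, iff 11 divides n).
import Mathlib
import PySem

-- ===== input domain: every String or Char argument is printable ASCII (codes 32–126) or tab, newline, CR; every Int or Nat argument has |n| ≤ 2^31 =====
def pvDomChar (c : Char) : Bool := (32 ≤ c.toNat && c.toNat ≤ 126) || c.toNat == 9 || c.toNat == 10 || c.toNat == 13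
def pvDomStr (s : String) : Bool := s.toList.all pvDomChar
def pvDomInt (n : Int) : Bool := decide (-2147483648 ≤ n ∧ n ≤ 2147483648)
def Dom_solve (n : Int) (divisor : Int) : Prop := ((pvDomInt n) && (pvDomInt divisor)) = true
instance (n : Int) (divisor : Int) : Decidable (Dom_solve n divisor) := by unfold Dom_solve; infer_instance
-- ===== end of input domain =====

-- B replaces A's unmemoized branching recursion by a closed-form O(1) test (faster).


-- ===== PORT A =====

-- value of Python's int('1'*k): the k-digit repunit (0 for k = 0)
def onesVal : Nat → Int
  | 0 => 0
  | k + 1 => onesVal k * 10 + 1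

-- int('1'*divisor) (A only evaluates it with divisor ≥ 2, where the string parses)
def repunit (d : Int) : Int := onesVal d.toNat

theorem onesVal_nonneg (k : Nat) : 0 ≤ onesVal k := by
  induction k with
  | zero => simp [onesVal]
  | succ k ih => simp only [onesVal]; omega

theorem onesVal_pos {k : Nat} (h : 1 ≤ k) : 1 ≤ onesVal k := by
  obtain ⟨m, rfl⟩ := Nat.exists_eq_add_of_le h
  have := onesVal_nonneg m
  simp only [Nat.add_comm, onesVal]; omega

def solve (n : Int) (divisor : Int) : Bool :=
  if divisor ≤ 1 ∨ n < 11 ∨ (PySem.Str.len (PySem.Int.toStr n) = 2 ∧ PySem.Int.mod n 11 ≠ 0) then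
    false
  else if PySem.Int.mod n (repunit divisor) = 0 then
    true
  else if divisor = 2 then
    decide (PySem.Int.mod n 11 = 0)
  else
    solve (n - repunit divisor) divisor || solve n (divisor - 1)
termination_by (n.toNat, divisor.toNat)
decreasing_by
  · apply Prod.Lex.left
    have h1 : 1 ≤ onesVal divisor.toNat := onesVal_pos (by omega)
    simp only [repunit]; omega
  · apply Prod.Lex.right
    omega

-- ===== PORT B =====
def solve_alt (n : Int) (divisor : Int) : Bool :=
  if divisor ≤ 1 ∨ n < 11 then false
  else if divisor = 2 then decide (PySem.Int.mod n 11 = 0)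
  else decide (111 * PySem.Int.mod n 11 ≤ n)

-- ===== PRECONDITION & SPEC =====
def Spec_solve (n : Int) (divisor : Int) (out : Bool) : Prop := out = solve_alt n divisor
instance (n : Int) (divisor : Int) (out : Bool) : Decidable (Spec_solve n divisor out) := by
  unfold Spec_solve; infer_instance

-- ===== CLAIM (what is proved, stated in full; the proofs are below) =====
def Claim_equal_solve : Prop := ∀ (n : Int) (divisor : Int), Dom_solve n divisor → Spec_solve n divisor (solve n divisor)

-- ===== LEMMAS AND PROOFS =====

theorem onesVal_ge111 (k : Nat) (hk : 3 ≤ k) : 111 ≤ onesVal k := by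
  induction k with
  | zero => omega
  | succ k ih =>
    rcases Nat.lt_or_ge k 3 with h | h
    · have : k = 2 := by omega
      subst this; decide
    · have := ih h
      simp only [onesVal]; omega

theorem onesVal_mod11 (k : Nat) : onesVal k % 11 = 0 ∨ onesVal k % 11 = 1 := by
  induction k using Nat.strong_induction_on with
  | _ k ih =>
    match k with
    | 0 => left; decide
    | 1 => right; decide
    | (k + 2) =>
      have := ih k (by omega)
      simp only [onesVal] at *
      omega

theorem repunit_ge111 {d : Int} (h : 3 ≤ d) : 111 ≤ repunit d :=
  onesVal_ge111 d.toNat (by omega)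

theorem repunit_mod11 (d : Int) : repunit d % 11 = 0 ∨ repunit d % 11 = 1 :=
  onesVal_mod11 d.toNat

-- one unfolding step of Nat.toDigitsCore (fuel successor)
theorem core_succ (f n : Nat) (l : List Char) :
    Nat.toDigitsCore 10 (f + 1) n l =
      if n / 10 = 0 then (n % 10).digitChar :: l
      else Nat.toDigitsCore 10 f (n / 10) ((n % 10).digitChar :: l) := by
  simp [Nat.toDigitsCore]

theorem core_len_ge (f : Nat) : ∀ (n : Nat) (l : List Char),
    l.length + 1 ≤ (Nat.toDigitsCore 10 (f + 1) n l).length := by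
  induction f with
  | zero =>
    intro n l
    rw [core_succ]
    split
    · simp
    · simp [Nat.toDigitsCore]
  | succ f ih =>
    intro n l
    rw [core_succ]
    split
    · simp
    · calc l.length + 1 ≤ ((n % 10).digitChar :: l).length + 1 := by simp
        _ ≤ _ := ih (n / 10) ((n % 10).digitChar :: l)

theorem toDigits_len_two (m : Nat) (h1 : 10 ≤ m) (h2 : m ≤ 99) :
    (Nat.toDigits 10 m).length = 2 := by
  obtain ⟨k, rfl⟩ := Nat.exists_eq_add_of_le h1
  show (Nat.toDigitsCore 10 (10 + k + 1) (10 + k) []).length = 2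
  rw [core_succ, if_neg (by omega)]
  rw [show 10 + k = (9 + k) + 1 by omega, core_succ, if_pos (by omega)]
  simp

theorem core_len_ge1 (f n : Nat) (l : List Char) (hf : 1 ≤ f) :
    l.length + 1 ≤ (Nat.toDigitsCore 10 f n l).length := by
  obtain ⟨f', rfl⟩ : ∃ f', f = f' + 1 := ⟨f - 1, by omega⟩
  exact core_len_ge f' n l

theorem core_len_ge2 (f n : Nat) (l : List Char) (hf : 2 ≤ f) (hn : ¬ n / 10 = 0) :
    l.length + 2 ≤ (Nat.toDigitsCore 10 f n l).length := by
  obtain ⟨f', rfl⟩ : ∃ f', f = f' + 1 := ⟨f - 1, by omega⟩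
  rw [core_succ, if_neg hn]
  have h := core_len_ge1 f' (n / 10) ((n % 10).digitChar :: l) (by omega)
  simpa using h

theorem toDigits_len_ge3 (m : Nat) (h1 : 100 ≤ m) :
    3 ≤ (Nat.toDigits 10 m).length := by
  obtain ⟨k, rfl⟩ := Nat.exists_eq_add_of_le h1
  show 3 ≤ (Nat.toDigitsCore 10 (100 + k + 1) (100 + k) []).length
  rw [core_succ, if_neg (by omega)]
  have h := core_len_ge2 (100 + k) ((100 + k) / 10) [((100 + k) % 10).digitChar]
    (by omega) (by omega)
  simpa using h

theorem len_two_iff {n : Int} (h : 11 ≤ n) :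
    (PySem.Str.len (PySem.Int.toStr n) = 2) ↔ n ≤ 99 := by
  rw [PySem.Str.len, PySem.Int.toList_toStr]
  simp only [PySem.Int.toChars, if_neg (show ¬ n < 0 by omega)]
  constructor
  · intro hl
    by_contra hgt
    have h3 := toDigits_len_ge3 n.toNat (by omega)
    omega
  · intro hle
    have h2 := toDigits_len_two n.toNat (by omega) (by omega)
    omega

theorem alt_small {n d : Int} (h : d ≤ 1 ∨ n < 11) : solve_alt n d = false := by
  simp only [solve_alt]
  rw [if_pos h]

theorem alt_two {n : Int} (hn : 11 ≤ n) : solve_alt n 2 = decide (n % 11 = 0) := by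
  simp only [solve_alt]
  rw [if_neg (by omega)]
  simp

theorem alt_big {n d : Int} (hd : 3 ≤ d) (hn : 11 ≤ n) :
    solve_alt n d = decide (111 * (n % 11) ≤ n) := by
  simp only [solve_alt]
  rw [if_neg (by omega), if_neg (by omega),
    PySem.Int.mod_eq_emod_of_pos (show (0:Int) < 11 by norm_num)]

theorem solve_eq_alt (n divisor : Int) : solve n divisor = solve_alt n divisor := by
  fun_induction solve n divisor with
  | case1 n d hC =>
    by_cases hsd : d ≤ 1 ∨ n < 11
    · rw [alt_small hsd]
    · push_neg at hsd
      obtain ⟨hd, hn⟩ := hsd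
      rcases hC with h | h | ⟨hlen, hm⟩
      · omega
      · omega
      · rw [PySem.Int.mod_eq_emod_of_pos (show (0:Int) < 11 by norm_num)] at hm
        have h99 : n ≤ 99 := (len_two_iff hn).mp hlen
        by_cases hd2 : d = 2
        · subst hd2
          rw [alt_two hn]
          symm
          simp only [decide_eq_false_iff_not]
          exact hm
        · rw [alt_big (by omega) hn]
          symm
          simp only [decide_eq_false_iff_not]
          have hr0 : 0 ≤ n % 11 := by omega
          have hr1 : n % 11 ≠ 0 := hm
          omega
  | case2 n d hC hmod =>
    push_neg at hC
    obtain ⟨hd, hn, hlen⟩ := hC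
    have hdvd : repunit d ∣ n := (PySem.Int.mod_eq_zero_iff_dvd n (repunit d)).mp hmod
    by_cases hd2 : d = 2
    · subst hd2
      have hr : repunit 2 = 11 := by decide
      rw [hr] at hdvd
      rw [alt_two hn]
      symm
      simp only [decide_eq_true_eq]
      omega
    · have hd3 : 3 ≤ d := by omega
      have hR : 111 ≤ repunit d := repunit_ge111 hd3
      obtain ⟨m, rfl⟩ := hdvd
      set R := repunit d with hRdef
      have hm1 : 1 ≤ m := by
        by_contra hcon
        push_neg at hcon
        nlinarith [mul_nonneg (show (0:Int) ≤ R by omega) (show (0:Int) ≤ 1 - m by omega)]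
      rw [alt_big hd3 hn]
      symm
      simp only [decide_eq_true_eq]
      have hmm : (R * m) % 11 = (R % 11 * (m % 11)) % 11 := Int.mul_emod R m 11
      rcases repunit_mod11 d with he | he
      · rw [← hRdef] at he
        rw [hmm, he, zero_mul, Int.zero_emod]
        nlinarith [mul_nonneg (show (0:Int) ≤ R by omega) (show (0:Int) ≤ m by omega)]
      · rw [← hRdef] at he
        rw [hmm, he, one_mul, Int.emod_emod_of_dvd m (dvd_refl 11)]
        have ha : 0 ≤ m % 11 := by omega
        have hb : m % 11 ≤ m := by omega
        nlinarith [mul_nonneg (show (0:Int) ≤ R - 111 by omega) (show (0:Int) ≤ m by omega),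
          mul_nonneg (show (0:Int) ≤ (111:Int) by norm_num) (show (0:Int) ≤ m - m % 11 by omega)]
  | case3 n hC hmod =>
    push_neg at hC
    obtain ⟨hd, hn, hlen⟩ := hC
    rw [alt_two hn]
    simp only [PySem.Int.mod_eq_emod_of_pos (show (0:Int) < 11 by norm_num)]
  | case4 n d hC hmod hd2 ih1 ih2 =>
    push_neg at hC
    obtain ⟨hd, hn, hlen⟩ := hC
    have hd3 : 3 ≤ d := by omega
    have hR : 111 ≤ repunit d := repunit_ge111 hd3
    have hsm : n ≤ 99 → n % 11 = 0 := by
      intro hle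
      have h := hlen ((len_two_iff hn).mpr hle)
      rwa [PySem.Int.mod_eq_emod_of_pos (show (0:Int) < 11 by norm_num)] at h
    rw [ih1, ih2, alt_big hd3 hn]
    rw [PySem.Int.mod_eq_emod_of_pos (show (0:Int) < repunit d by omega)] at hmod
    by_cases hd4 : d = 3
    · subst hd4
      have h111 : repunit 3 = 111 := by decide
      rw [h111] at hmod hR ⊢
      rw [show (3:Int) - 1 = 2 by norm_num, alt_two hn]
      by_cases hnn : n - 111 < 11
      · rw [alt_small (Or.inr hnn)]
        simp only [Bool.false_or]
        rw [decide_eq_decide]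
        by_cases hle : n ≤ 99
        · have h0 := hsm hle
          omega
        · omega
      · rw [alt_big (by norm_num) (by omega : (11:Int) ≤ n - 111)]
        have hsub : (n - 111) % 11 = (n % 11 - 1) % 11 := by
          rw [Int.sub_emod]
          norm_num
        by_cases hQ : n % 11 = 0
        · simp [hQ, show (0:Int) ≤ n by omega]
        · have h0 : 0 ≤ n % 11 := Int.emod_nonneg n (by norm_num)
          have h1 : n % 11 < 11 := Int.emod_lt_of_pos n (by norm_num)
          have hr1 : (n % 11 - 1) % 11 = n % 11 - 1 := Int.emod_eq_of_lt (by omega) (by omega)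
          rw [hsub, hr1]
          simp only [hQ, decide_false, Bool.or_false]
          rw [decide_eq_decide]
          omega
    · have hd5 : 3 ≤ d - 1 := by omega
      rw [alt_big hd5 hn]
      by_cases hc : 111 * (n % 11) ≤ n
      · simp [hc]
      · have hb : solve_alt (n - repunit d) d = false := by
          by_cases hnn : n - repunit d < 11
          · exact alt_small (Or.inr hnn)
          · rw [alt_big hd3 (by omega : (11:Int) ≤ n - repunit d)]
            simp only [decide_eq_false_iff_not]
            intro hcon
            rcases repunit_mod11 d with he | he
            · rw [Int.sub_emod, he, sub_zero, Int.emod_emod_of_dvd n (dvd_refl 11)] at hcon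
              apply hc
              omega
            · rw [Int.sub_emod, he] at hcon
              by_cases hz : n % 11 = 0
              · apply hc
                rw [hz]
                omega
              · have h0 : 0 ≤ n % 11 := Int.emod_nonneg n (by norm_num)
                have h1 : n % 11 < 11 := Int.emod_lt_of_pos n (by norm_num)
                have hq : (n % 11 - 1) % 11 = n % 11 - 1 := Int.emod_eq_of_lt (by omega) (by omega)
                rw [hq] at hcon
                apply hc
                omega
        rw [hb]
        simp [hc]

-- ===== VERDICT (by name: the statement is the Claim_ definition above) =====
theorem solve_spec : Claim_equal_solve := by
  intro n divisor _
  unfold Spec_solve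
  exact solve_eq_alt n divisor
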